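-- pv_equiv track=rewrite | github.com/euhidaman/EmberNet | eval/robot_risk_benchmarks.py | _normalize_robot_name
-- ===== SOURCE A (Python) =====
-- KNOWN_ROBOTS = [
--     "Drone",
--     "Humanoid",
--     "Robot with Legs",
--     "Robot with Wheels",
--     "Underwater Robot",
-- ]
--
-- def _normalize_robot_name(name: str) -> str:
--     name = name.strip()
--     for known in KNOWN_ROBOTS:
--         if name.lower() == known.lower():
--             return known
--     for known in KNOWN_ROBOTS:
--         if name.lower() in known.lower() or known.lower() in name.lower():
--             return known
--     return name
-- ===== SOURCE B (Python) =====
-- KNOWN_ROBOTS = [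
--     "Drone",
--     "Humanoid",
--     "Robot with Legs",
--     "Robot with Wheels",
--     "Underwater Robot",
-- ]
--
-- def _normalize_robot_name(name: str) -> str:
--     stripped = name.strip()
--     low = stripped.lower()
--     candidate = None
--     for known in KNOWN_ROBOTS:
--         kl = known.lower()
--         if low == kl:
--             return known
--         if candidate is None and (low in kl or kl in low):
--             candidate = known
--     return candidate if candidate is not None else stripped
-- ===== Notes on version B (the rewrite author's own statement) =====
-- stated objective: simpler
-- what changed: Replaces A's two sequential scans over KNOWN_ROBOTS (exact pass, then substring pass) with one single pass that lowercases the name once, returns immediately on an exact match and records only the first substring candidate.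
import Mathlib
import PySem

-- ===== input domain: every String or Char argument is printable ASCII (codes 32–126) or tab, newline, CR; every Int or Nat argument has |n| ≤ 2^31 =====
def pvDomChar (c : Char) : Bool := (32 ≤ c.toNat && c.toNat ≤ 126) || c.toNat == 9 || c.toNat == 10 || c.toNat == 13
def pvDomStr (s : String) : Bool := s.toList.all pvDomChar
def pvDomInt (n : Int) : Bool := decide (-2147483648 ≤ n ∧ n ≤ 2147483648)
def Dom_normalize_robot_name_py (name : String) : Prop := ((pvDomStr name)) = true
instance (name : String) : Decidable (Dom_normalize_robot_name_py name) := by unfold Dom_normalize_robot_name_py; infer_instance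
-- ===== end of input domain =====

-- B replaces A's two sequential scans over KNOWN_ROBOTS with a single pass that
-- lowercases the name once, returns immediately on an exact match and records the
-- first substring candidate (objective: simpler).

def pvKnownRobots : List String :=
  ["Drone", "Humanoid", "Robot with Legs", "Robot with Wheels", "Underwater Robot"]

-- ===== PORT A =====
-- first loop: exact case-insensitive match
def pvALoop1 (name : String) : List String → Option String
  | [] => none
  | known :: rest =>
    if PySem.Str.lower name = PySem.Str.lower known then some known
    else pvALoop1 name rest

-- second loop: substring match either way
def pvALoop2 (name : String) : List String → Option String
  | [] => none
  | known :: rest =>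
    if PySem.Str.isIn (PySem.Str.lower name) (PySem.Str.lower known)
       || PySem.Str.isIn (PySem.Str.lower known) (PySem.Str.lower name) then some known
    else pvALoop2 name rest

def normalize_robot_name_py (name : String) : String :=
  let name := PySem.Str.strip name
  match pvALoop1 name pvKnownRobots with
  | some k => k
  | none =>
    match pvALoop2 name pvKnownRobots with
    | some k => k
    | none => name

-- ===== PORT B =====
-- single pass: return on exact match, record the first substring candidate
def pvBLoop (low : String) (cand : Option String) : List String → Option String
  | [] => cand
  | known :: rest =>
    let kl := PySem.Str.lower known
    if low = kl then some known
    else if cand = none && (PySem.Str.isIn low kl || PySem.Str.isIn kl low) then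
      pvBLoop low (some known) rest
    else
      pvBLoop low cand rest

def normalize_robot_name_py_alt (name : String) : String :=
  let stripped := PySem.Str.strip name
  match pvBLoop (PySem.Str.lower stripped) none pvKnownRobots with
  | some k => k
  | none => stripped

-- ===== PRECONDITION & SPEC =====
def Spec_normalize_robot_name_py (name : String) (out : String) : Prop := out = normalize_robot_name_py_alt name
instance (name : String) (out : String) : Decidable (Spec_normalize_robot_name_py name out) := by unfold Spec_normalize_robot_name_py; infer_instance

-- ===== CLAIM (what is proved, stated in full; the proofs are below) =====
def Claim_equal_normalize_robot_name_py : Prop := ∀ (name : String), Dom_normalize_robot_name_py name → Spec_normalize_robot_name_py name (normalize_robot_name_py name)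

-- ===== LEMMAS AND PROOFS =====

-- The one-pass loop equals the two sequential scans: an exact match wins, an
-- already-recorded candidate beats later substring matches.
theorem pvBLoop_eq (name : String) :
    ∀ (l : List String) (cand : Option String),
      pvBLoop (PySem.Str.lower name) cand l =
        match pvALoop1 name l with
        | some k => some k
        | none =>
          match cand with
          | some c => some c
          | none => pvALoop2 name l := by
  intro l
  induction l with
  | nil => intro cand; cases cand <;> simp [pvBLoop, pvALoop1, pvALoop2]
  | cons known rest ih =>
    intro cand
    by_cases hex : PySem.Str.lower name = PySem.Str.lower known
    · simp [pvBLoop, pvALoop1, hex]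
    · cases cand with
      | some c =>
        simp [pvBLoop, pvALoop1, pvALoop2, hex, ih]
      | none =>
        by_cases h1 : PySem.Chars.isIn (PySem.Chars.lower name.toList)
            (PySem.Chars.lower known.toList) = true <;>
          by_cases h2 : PySem.Chars.isIn (PySem.Chars.lower known.toList)
            (PySem.Chars.lower name.toList) = true <;>
          simp [pvBLoop, pvALoop1, pvALoop2, hex, h1, h2, ih]

-- ===== VERDICT (by name: the statement is the Claim_ definition above) =====
theorem normalize_robot_name_py_spec : Claim_equal_normalize_robot_name_py := by
  intro name _
  unfold Spec_normalize_robot_name_py normalize_robot_name_py normalize_robot_name_py_alt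
  simp only [pvBLoop_eq (PySem.Str.strip name) pvKnownRobots none]
  cases h1 : pvALoop1 (PySem.Str.strip name) pvKnownRobots <;>
    cases h2 : pvALoop2 (PySem.Str.strip name) pvKnownRobots <;> simp
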